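-- pv_equiv track=rewrite | github.com/AsWali/MineAgentFinal | utils.py | transform_action
-- ===== SOURCE A (Python) =====
-- from itertools import product
--
-- def transform_action(value):
--     array = [0, 0, 0, 12, 12, 0, 0, 0]
--     if value == 0:
--         return array
--     elif value == 1:
--         array[5] = 1
--     elif value == 2:
--         array[5] = 3
--     elif value == 3:
--         array[0] = 1
--     elif value == 4:
--         array[0] = 1
--         array[2] = 1
--     elif value == 5:
--         array[2] = 1
--     elif value == 6:
--         array[0] = 2
--     elif value == 7:
--         array[1] = 1
--     elif value == 8:
--         array[1] = 2
--     else: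
--         combinations = [(x, y) for x, y in product(range(-4, 5), repeat=2) if (x, y) != (0, 0)]
--         result_dict = {i+9: tuple(combination) for i, combination in enumerate(combinations)}
--         pitch, yaw = result_dict[value]
--         array[3] += pitch
--         array[4] += yaw
--
--     return array
-- ===== SOURCE B (Python) =====
-- def transform_action(value):
--     array = [0, 0, 0, 12, 12, 0, 0, 0]
--     if value == 0:
--         return array
--     elif value == 1:
--         array[5] = 1
--     elif value == 2:
--         array[5] = 3
--     elif value == 3:
--         array[0] = 1
--     elif value == 4:
--         array[0] = 1
--         array[2] = 1
--     elif value == 5: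
--         array[2] = 1
--     elif value == 6:
--         array[0] = 2
--     elif value == 7:
--         array[1] = 1
--     elif value == 8:
--         array[1] = 2
--     else:
--         if value not in range(9, 89):
--             raise KeyError(value)
--         idx = value - 9
--         flat = idx if idx < 40 else idx + 1  # skip the (0,0) hole at grid position 40
--         array[3] += flat // 9 - 4
--         array[4] += flat % 9 - 4
--     return array
-- ===== Notes on version B (the rewrite author's own statement) =====
-- stated objective: simpler
-- what changed: The camera branch no longer builds the product/enumerate lookup dict: B decodes the offset index arithmetically on the 9x9 pitch/yaw grid (skipping the zero-delta hole) with floor division and modulus, and raises KeyError on exactly the values where the dict lookup raised.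
import Mathlib
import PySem

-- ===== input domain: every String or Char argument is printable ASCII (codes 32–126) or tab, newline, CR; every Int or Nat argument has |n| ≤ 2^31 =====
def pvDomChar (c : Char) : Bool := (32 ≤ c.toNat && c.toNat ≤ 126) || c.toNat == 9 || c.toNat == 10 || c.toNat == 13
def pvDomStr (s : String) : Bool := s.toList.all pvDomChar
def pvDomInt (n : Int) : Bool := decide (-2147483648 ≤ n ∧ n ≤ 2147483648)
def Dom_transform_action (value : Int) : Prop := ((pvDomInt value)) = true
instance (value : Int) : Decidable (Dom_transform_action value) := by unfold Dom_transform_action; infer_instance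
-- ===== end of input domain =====

-- B replaces A's product/enumerate/dict decoding of camera actions by direct arithmetic
-- (flat = value-9, skipping the (0,0) hole; pitch = flat//9-4, yaw = flat%9-4): simpler, no table built.

-- ===== PORT A =====
def transform_action (value : Int) : List Int :=
  let array : List Int := [0, 0, 0, 12, 12, 0, 0, 0]
  if value = 0 then array
  else if value = 1 then array.set 5 1
  else if value = 2 then array.set 5 3
  else if value = 3 then array.set 0 1
  else if value = 4 then (array.set 0 1).set 2 1
  else if value = 5 then array.set 2 1
  else if value = 6 then array.set 0 2
  else if value = 7 then array.set 1 1
  else if value = 8 then array.set 1 2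
  else
    let combinations : List (Int × Int) :=
      ((PySem.List.pyRange (-4) 5 1).flatMap (fun x =>
        (PySem.List.pyRange (-4) 5 1).map (fun y => (x, y)))).filter
        (fun p => p != ((0 : Int), (0 : Int)))
    let result_dict : PySem.Dict Int (Int × Int) :=
      (PySem.List.enumerate combinations).foldl
        (fun d ic => d.insert (ic.1 + 9) ic.2) PySem.Dict.empty
    match result_dict.get? value with
    | some (pitch, yaw) =>
        (array.set 3 (array.getD 3 0 + pitch)).set 4 (array.getD 4 0 + yaw)
    | none => []   -- Python raises KeyError here; excluded by Pre_

-- ===== PORT B =====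
def transform_action_alt (value : Int) : List Int :=
  let array : List Int := [0, 0, 0, 12, 12, 0, 0, 0]
  if value = 0 then array
  else if value = 1 then array.set 5 1
  else if value = 2 then array.set 5 3
  else if value = 3 then array.set 0 1
  else if value = 4 then (array.set 0 1).set 2 1
  else if value = 5 then array.set 2 1
  else if value = 6 then array.set 0 2
  else if value = 7 then array.set 1 1
  else if value = 8 then array.set 1 2
  else if 9 ≤ value ∧ value < 89 then
    let idx := value - 9
    let flat := if idx < 40 then idx else idx + 1
    (array.set 3 (array.getD 3 0 + (PySem.Int.floordiv flat 9 - 4))).set 4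
      (array.getD 4 0 + (PySem.Int.mod flat 9 - 4))
  else []   -- Python raises KeyError here; excluded by Pre_

-- ===== PRECONDITION & SPEC =====
-- A raises KeyError on any value outside 0..88 (the dict has keys 9..88 only); those inputs are excluded.
def Pre_transform_action (value : Int) : Prop := 0 ≤ value ∧ value ≤ 88
instance (value : Int) : Decidable (Pre_transform_action value) := by unfold Pre_transform_action; infer_instance
def pvWitness_transform_action : Int := 42
def Spec_transform_action (value : Int) (out : List Int) : Prop := out = transform_action_alt value
instance (value : Int) (out : List Int) : Decidable (Spec_transform_action value out) := by unfold Spec_transform_action; infer_instance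

-- ===== CLAIM (what is proved, stated in full; the proofs are below) =====
def Claim_equal_transform_action : Prop := ∀ (value : Int), Dom_transform_action value → Pre_transform_action value → Spec_transform_action value (transform_action value)

-- ===== LEMMAS AND PROOFS =====
set_option maxRecDepth 20000 in
theorem transform_action_eq_alt_nat : ∀ n : Nat, n < 89 →
    transform_action (n : Int) = transform_action_alt (n : Int) := by decide

-- ===== VERDICT (by name: the statement is the Claim_ definition above) =====
theorem transform_action_spec : Claim_equal_transform_action := by
  intro value _ hpre
  have h0 : 0 ≤ value := hpre.1
  have h2 : value ≤ 88 := hpre.2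
  have h1 : value.toNat < 89 := by omega
  have hv : (value.toNat : Int) = value := Int.toNat_of_nonneg h0
  have := transform_action_eq_alt_nat value.toNat h1
  rw [hv] at this
  exact this
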